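-- pv_equiv track=rewrite | github.com/mcchilds01/advent-of-code | 2020/script/day_9.py | getWeakness
-- ===== SOURCE A (Python) =====
-- def getWeakness(numbers_list: list, preamble_length: int) -> int:
--     sorted_preamble = []
--     sums = []
--     for i in range(len(numbers_list)):
--         if i < preamble_length:
--             continue
--         else:
--             sorted_preamble = sorted(numbers_list[i-preamble_length:i])
--             sums = [sorted_preamble[j]+sorted_preamble[k] for j in range(len(sorted_preamble)) for k in
--                 range(len(sorted_preamble)) if sorted_preamble[j]+sorted_preamble[k] == numbers_list[i]]
--             if sums == []:
--                 return numbers_list[i]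
--             sums = []
-- ===== SOURCE B (Python) =====
-- def getWeakness(numbers_list: list, preamble_length: int) -> int:
--     for i in range(len(numbers_list)):
--         if i < preamble_length:
--             continue
--         window = set(numbers_list[i - preamble_length:i])
--         target = numbers_list[i]
--         if not any(target - x in window for x in window):
--             return target
-- ===== Notes on version B (the rewrite author's own statement) =====
-- stated objective: faster
-- what changed: Per window index, A sorts the preceding window and builds a quadratic comprehension of all matching pair sums; B does a single hash-set two-sum membership check over the unsorted window (j may equal k in A, which the set check reproduces since x and t-x may be the same element).
import Mathlib
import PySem

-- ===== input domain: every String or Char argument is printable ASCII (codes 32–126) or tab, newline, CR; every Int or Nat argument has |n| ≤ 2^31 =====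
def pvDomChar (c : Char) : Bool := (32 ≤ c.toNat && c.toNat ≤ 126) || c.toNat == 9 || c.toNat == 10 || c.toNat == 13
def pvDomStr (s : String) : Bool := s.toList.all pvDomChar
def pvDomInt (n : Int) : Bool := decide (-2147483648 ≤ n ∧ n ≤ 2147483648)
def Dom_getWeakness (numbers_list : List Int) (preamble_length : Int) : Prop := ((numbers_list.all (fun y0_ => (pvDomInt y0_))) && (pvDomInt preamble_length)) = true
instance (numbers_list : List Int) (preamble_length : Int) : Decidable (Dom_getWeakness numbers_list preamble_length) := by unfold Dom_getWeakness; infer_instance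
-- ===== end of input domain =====

-- B replaces A's per-index sorted-window double scan by a hash-set two-sum check per window (O(n·p) vs O(n·p²)); return values are proved identical on all inputs.

-- ===== PORT A =====
-- for i in range(len): if i < p: continue; else sort the window, build the comprehension 'sums', return xs[i] if it is empty
def getWeaknessLoopA (xs : List Int) (p : Int) : List Int → Option Int
  | [] => none
  | i :: rest =>
    if i < p then getWeaknessLoopA xs p rest
    else
      let sp := PySem.List.sorted (PySem.List.slice xs (some (i - p)) (some i)) (fun x => x) false
      let t := PySem.List.pyGetD xs i 0
      let sums := (PySem.List.pyRange 0 sp.length 1).flatMap (fun j =>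
        (PySem.List.pyRange 0 sp.length 1).filterMap (fun k =>
          if PySem.List.pyGetD sp j 0 + PySem.List.pyGetD sp k 0 = t then
            some (PySem.List.pyGetD sp j 0 + PySem.List.pyGetD sp k 0) else none))
      if sums = [] then some t else getWeaknessLoopA xs p rest

def getWeakness (numbers_list : List Int) (preamble_length : Int) : Option Int :=
  getWeaknessLoopA numbers_list preamble_length (PySem.List.pyRange 0 numbers_list.length 1)

-- ===== PORT B =====
-- for i in range(len): if i < p: continue; window = set(slice); return xs[i] unless any(t - x in window for x in window)
def getWeaknessLoopB (xs : List Int) (p : Int) : List Int → Option Int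
  | [] => none
  | i :: rest =>
    if i < p then getWeaknessLoopB xs p rest
    else
      let window : PySem.Set Int := PySem.Set.ofList (PySem.List.slice xs (some (i - p)) (some i))
      let target := PySem.List.pyGetD xs i 0
      if !(window.any (fun x => PySem.Set.contains window (target - x))) then some target
      else getWeaknessLoopB xs p rest

def getWeakness_alt (numbers_list : List Int) (preamble_length : Int) : Option Int :=
  getWeaknessLoopB numbers_list preamble_length (PySem.List.pyRange 0 numbers_list.length 1)

-- ===== PRECONDITION & SPEC =====
def Spec_getWeakness (numbers_list : List Int) (preamble_length : Int) (out : Option Int) : Prop := out = getWeakness_alt numbers_list preamble_length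
instance (numbers_list : List Int) (preamble_length : Int) (out : Option Int) : Decidable (Spec_getWeakness numbers_list preamble_length out) := by unfold Spec_getWeakness; infer_instance

-- ===== CLAIM (what is proved, stated in full; the proofs are below) =====
def Claim_equal_getWeakness : Prop := ∀ (numbers_list : List Int) (preamble_length : Int), Dom_getWeakness numbers_list preamble_length → Spec_getWeakness numbers_list preamble_length (getWeakness numbers_list preamble_length)

-- ===== LEMMAS AND PROOFS =====

-- The per-step test of A (no pair of positions j,k of the sorted window sums to t) coincides with
-- the per-step test of B (no window value x has a partner t - x in the window), since sorting
-- preserves membership and the positions range over the whole window.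
lemma cond_iff (L : List Int) (t : Int) :
    (∀ (x : ℤ), 0 ≤ x → x < (L.length : ℤ) → ∀ (a : ℤ), 0 ≤ a → a < (L.length : ℤ) →
      ¬(PySem.List.pyGetD (PySem.List.sorted L (fun x => x) false) x 0 +
        PySem.List.pyGetD (PySem.List.sorted L (fun x => x) false) a 0 = t))
    ↔ (∀ x ∈ L, t - x ∉ L) := by
  have hlen : (PySem.List.sorted L (fun x => x) false).length = L.length :=
    PySem.List.length_sorted L (fun x => x) false
  constructor
  · intro h x hx hmem
    have hx' : x ∈ PySem.List.sorted L (fun x => x) false := (PySem.List.mem_sorted L _ _ x).mpr hx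
    have hy' : t - x ∈ PySem.List.sorted L (fun x => x) false := (PySem.List.mem_sorted L _ _ _).mpr hmem
    obtain ⟨j, hj, hje⟩ := List.mem_iff_getElem.mp hx'
    obtain ⟨k, hk, hke⟩ := List.mem_iff_getElem.mp hy'
    refine h (j : ℤ) (by omega) (by omega) (k : ℤ) (by omega) (by omega) ?_
    rw [PySem.List.pyGetD_eq_getElem _ 0 (by omega) (by omega),
        PySem.List.pyGetD_eq_getElem _ 0 (by omega) (by omega)]
    simp only [Int.toNat_natCast]
    rw [hje, hke]; ring
  · intro h j hj0 hjl k hk0 hkl heq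
    rw [PySem.List.pyGetD_eq_getElem _ 0 hj0 (by omega),
        PySem.List.pyGetD_eq_getElem _ 0 hk0 (by omega)] at heq
    have hjm : (PySem.List.sorted L (fun x => x) false)[j.toNat]'(by omega) ∈ L :=
      (PySem.List.mem_sorted L _ _ _).mp (List.getElem_mem _)
    have hkm : (PySem.List.sorted L (fun x => x) false)[k.toNat]'(by omega) ∈ L :=
      (PySem.List.mem_sorted L _ _ _).mp (List.getElem_mem _)
    exact h _ hjm (by rw [show t - (PySem.List.sorted L (fun x => x) false)[j.toNat]'(by omega) =
      (PySem.List.sorted L (fun x => x) false)[k.toNat]'(by omega) from by omega]; exact hkm)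

lemma loops_eq (xs : List Int) (p : Int) (idxs : List Int) :
    getWeaknessLoopA xs p idxs = getWeaknessLoopB xs p idxs := by
  induction idxs with
  | nil => rfl
  | cons i rest ih =>
    simp only [getWeaknessLoopA, getWeaknessLoopB]
    by_cases h : i < p
    · simp [h, ih]
    · simp [h, ih, cond_iff]

-- ===== VERDICT (by name: the statement is the Claim_ definition above) =====
theorem getWeakness_spec : Claim_equal_getWeakness := by
  intro xs p _
  unfold Spec_getWeakness getWeakness getWeakness_alt
  exact loops_eq xs p _
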